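-- pv_equiv track=rewrite | github.com/wattaihei/ProgrammingContest |  GCJ/2020/Round1A/probB.py | solve
-- ===== SOURCE A (Python) =====
-- def solve(N):
--     if N == 1: return [(1, 1)]
--     elif N == 2: return [(1, 1), (2, 1)]
--     elif N == 3: return [(1, 1), (2, 1), (3, 1)]
--     r = 2; s = 1
--     ans = [(1, 1), (2, 1)]
--     S = 2
--     while True:
--         if S + r > N:
--             break
--         S += r
--         r += 1
--         ans.append((r, 2))
--
--     for i in range(N-S):
--         ans.append((r+i, 1))
--
--     return ans
-- ===== SOURCE B (Python) =====
-- def _isqrt(n):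
--     # largest t >= 0 with t*t <= n, for n >= 0; binary search
--     lo, hi = 0, n + 1
--     while hi - lo > 1:
--         mid = (lo + hi) // 2
--         if mid * mid <= n:
--             lo = mid
--         else:
--             hi = mid
--     return lo
--
--
-- def solve(N):
--     if N == 1: return [(1, 1)]
--     elif N == 2: return [(1, 1), (2, 1)]
--     elif N == 3: return [(1, 1), (2, 1), (3, 1)]
--     # closed form: m = smallest m with m*(m+1) >= 2*N gives the break point
--     t = _isqrt(max(2 * N, 0))
--     if t * (t + 1) < 2 * N:
--         t += 1
--     k = t - 2
--     r = k + 2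
--     S = 1 + (k + 1) * (k + 2) // 2
--     return [(1, 1), (2, 1)] \
--         + [(j, 2) for j in range(3, r + 1)] \
--         + [(r + i, 1) for i in range(N - S)]
-- ===== Notes on version B (the rewrite author's own statement) =====
-- stated objective: alternative
-- what changed: Replaced A's accumulating while-loop search for the break point with a closed form: the break row is computed directly from an integer square root (binary search on the quadratic), and the answer list is built by two comprehensions instead of repeated appends.
import Mathlib
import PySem

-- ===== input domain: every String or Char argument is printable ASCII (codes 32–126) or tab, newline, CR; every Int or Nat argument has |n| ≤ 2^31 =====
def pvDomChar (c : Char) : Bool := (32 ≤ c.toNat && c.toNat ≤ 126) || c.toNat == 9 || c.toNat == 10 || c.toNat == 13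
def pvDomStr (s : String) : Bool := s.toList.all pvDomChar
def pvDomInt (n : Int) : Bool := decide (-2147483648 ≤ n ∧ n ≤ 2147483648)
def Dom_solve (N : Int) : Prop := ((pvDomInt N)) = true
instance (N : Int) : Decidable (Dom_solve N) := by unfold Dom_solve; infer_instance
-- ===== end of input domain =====

-- B replaces A's accumulating search loop by a closed-form break point (integer square
-- root by binary search) plus direct list construction; objective: alternative.

-- ===== PORT A =====
-- the 'while True' loop of A: state (S, r, ans); the proof argument 2 ≤ r only serves termination
def solveLoopA (N S r : Int) (ans : List (Int × Int)) (hr : 2 ≤ r) : Int × Int × List (Int × Int) :=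
  if _h : S + r ≤ N then
    solveLoopA N (S + r) (r + 1) (ans ++ [(r + 1, 2)]) (by omega)
  else (S, r, ans)
termination_by (N - S).toNat
decreasing_by omega

def solve (N : Int) : List (Int × Int) :=
  if N = 1 then [(1, 1)]
  else if N = 2 then [(1, 1), (2, 1)]
  else if N = 3 then [(1, 1), (2, 1), (3, 1)]
  else
    let res := solveLoopA N 2 2 [(1, 1), (2, 1)] (by omega)
    (PySem.List.pyRange 0 (N - res.1) 1).foldl (fun acc i => acc ++ [(res.2.1 + i, 1)]) res.2.2

-- ===== PORT B =====
-- binary-search integer square root (_isqrt of Source B)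
def isqrtLoop (n lo hi : Int) : Int :=
  if _h : hi - lo > 1 then
    let mid := PySem.Int.floordiv (lo + hi) 2
    if mid * mid ≤ n then isqrtLoop n mid hi else isqrtLoop n lo mid
  else lo
termination_by (hi - lo).toNat
decreasing_by
  · have h1 : lo + 1 ≤ PySem.Int.floordiv (lo + hi) 2 :=
      (PySem.Int.le_floordiv_iff_mul_le (by omega)).2 (by omega)
    omega
  · have h2 : PySem.Int.floordiv (lo + hi) 2 < hi :=
      (PySem.Int.floordiv_lt_iff_lt_mul (by omega)).2 (by omega)
    omega

def pyIsqrt (n : Int) : Int := isqrtLoop n 0 (n + 1)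

def solve_alt (N : Int) : List (Int × Int) :=
  if N = 1 then [(1, 1)]
  else if N = 2 then [(1, 1), (2, 1)]
  else if N = 3 then [(1, 1), (2, 1), (3, 1)]
  else
    let t0 := pyIsqrt (max (2 * N) 0)
    let t := if t0 * (t0 + 1) < 2 * N then t0 + 1 else t0
    let k := t - 2
    let r := k + 2
    let S := 1 + PySem.Int.floordiv ((k + 1) * (k + 2)) 2
    [(1, 1), (2, 1)] ++ (PySem.List.pyRange 3 (r + 1) 1).map (fun j => (j, 2))
      ++ (PySem.List.pyRange 0 (N - S) 1).map (fun i => (r + i, 1))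

-- ===== PRECONDITION & SPEC =====
def Spec_solve (N : Int) (out : List (Int × Int)) : Prop := out = solve_alt N
instance (N : Int) (out : List (Int × Int)) : Decidable (Spec_solve N out) := by unfold Spec_solve; infer_instance

-- ===== CLAIM (what is proved, stated in full; the proofs are below) =====
def Claim_equal_solve : Prop := ∀ (N : Int), Dom_solve N → Spec_solve N (solve N)

-- ===== LEMMAS AND PROOFS =====

-- correctness of the binary-search isqrt loop
theorem isqrtLoop_spec (n lo hi : Int) (h0 : 0 ≤ lo) (hlo : lo * lo ≤ n)
    (hhi : n < hi * hi) (hlt : lo < hi) :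
    isqrtLoop n lo hi * isqrtLoop n lo hi ≤ n ∧
      n < (isqrtLoop n lo hi + 1) * (isqrtLoop n lo hi + 1) ∧ 0 ≤ isqrtLoop n lo hi := by
  fun_induction isqrtLoop n lo hi with
  | case1 lo hi h mid hm ih =>
      exact ih (by
        have := (PySem.Int.le_floordiv_iff_mul_le (a := lo + hi) (b := 2) (q := lo + 1) (by omega)).2 (by omega)
        omega) hm hhi (by
        have := (PySem.Int.floordiv_lt_iff_lt_mul (a := lo + hi) (b := 2) (q := hi) (by omega)).2 (by omega)
        omega)
  | case2 lo hi h mid hm ih =>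
      exact ih h0 hlo (by omega) (by
        have := (PySem.Int.le_floordiv_iff_mul_le (a := lo + hi) (b := 2) (q := lo + 1) (by omega)).2 (by omega)
        omega)
  | case3 lo hi h =>
      have hhi1 : hi = lo + 1 := by omega
      subst hhi1
      exact ⟨hlo, hhi, h0⟩

theorem pyIsqrt_spec (n : Int) (hn : 0 ≤ n) :
    pyIsqrt n * pyIsqrt n ≤ n ∧ n < (pyIsqrt n + 1) * (pyIsqrt n + 1) ∧ 0 ≤ pyIsqrt n := by
  exact isqrtLoop_spec n 0 (n + 1) le_rfl (by omega) (by nlinarith) (by omega)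

-- characterisation of A's while loop
theorem solveLoopA_spec (N : Int) : ∀ (S r : Int) (ans : List (Int × Int)) (hr : 2 ≤ r),
    2 * S = 2 + (r - 1) * r →
    ∃ Sf rf : Int,
      solveLoopA N S r ans hr =
        (Sf, rf, ans ++ (PySem.List.pyRange (r + 1) (rf + 1) 1).map (fun j => (j, 2))) ∧
      r ≤ rf ∧ 2 * Sf = 2 + (rf - 1) * rf ∧ 2 * N ≤ rf * (rf + 1) ∧
      (∀ m : Int, r ≤ m → m < rf → m * (m + 1) < 2 * N) := by
  intro S r ans hr
  fun_induction solveLoopA N S r ans hr with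
  | case1 S r ans hr h ih =>
      intro hinv
      obtain ⟨Sf, rf, heq, hle, hSf, hub, hmin⟩ := ih (by linear_combination hinv)
      refine ⟨Sf, rf, ?_, by omega, hSf, hub, ?_⟩
      · rw [heq, PySem.List.pyRange_one_cons (show r + 1 < rf + 1 by omega)]
        simp
      · intro m hm1 hm2
        rcases eq_or_lt_of_le hm1 with hm | hm
        · subst hm; nlinarith
        · exact hmin m (by omega) hm2
  | case2 S r ans hr h =>
      intro hinv
      refine ⟨S, r, ?_, le_rfl, hinv, ?_, by omega⟩
      · rw [PySem.List.pyRange_one_eq_nil le_rfl]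
        simp
      · obtain ⟨c, hc⟩ := Int.even_mul_succ_self (n := r)
        have h2 : 2 * N < 2 + (c + c) := by nlinarith [hc]
        rw [hc]
        omega

-- x ↦ x(x+1) is monotone on the nonnegatives
theorem mul_succ_mono {a b : Int} (h0 : 0 ≤ a) (h : a ≤ b) : a * (a + 1) ≤ b * (b + 1) := by
  nlinarith

theorem solveA_nonpos (N : Int) (h : N ≤ 0) : solve N = [(1, 1), (2, 1)] := by
  unfold solve
  rw [if_neg (by omega), if_neg (by omega), if_neg (by omega)]
  rw [solveLoopA, dif_neg (by omega)]
  simp only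
  rw [PySem.List.pyRange_one_eq_nil (by omega)]
  rfl

theorem solveB_nonpos (N : Int) (h : N ≤ 0) : solve_alt N = [(1, 1), (2, 1)] := by
  unfold solve_alt
  rw [if_neg (by omega), if_neg (by omega), if_neg (by omega)]
  have hmax : max (2 * N) 0 = 0 := by omega
  rw [hmax]
  simp only [pyIsqrt]
  rw [isqrtLoop, dif_neg (by omega)]
  rw [if_neg (by omega)]
  have he0 : ((0 : Int) - 2 + 1) * (0 - 2 + 2) = 0 := by norm_num
  have hf0 : PySem.Int.floordiv 0 2 = 0 := by decide
  rw [he0, hf0]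
  rw [PySem.List.pyRange_one_eq_nil (by omega), PySem.List.pyRange_one_eq_nil (by omega)]
  simp

theorem solve_eq_of_ge (N : Int) (h4 : 4 ≤ N) : solve N = solve_alt N := by
  obtain ⟨Sf, rf, heq, hle, hSf, hub, hmin⟩ :=
    solveLoopA_spec N 2 2 [(1, 1), (2, 1)] (by omega) (by ring)
  -- the isqrt-based break point of B
  set t0 := pyIsqrt (max (2 * N) 0) with ht0
  have hmax : max (2 * N) 0 = 2 * N := by omega
  obtain ⟨hq1, hq2, hq3⟩ := pyIsqrt_spec (max (2 * N) 0) (by omega)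
  rw [← ht0] at hq1 hq2 hq3
  rw [hmax] at hq1 hq2
  have ht02 : 2 ≤ t0 := by nlinarith
  set t : Int := if t0 * (t0 + 1) < 2 * N then t0 + 1 else t0 with ht
  have hA1 : 2 * N ≤ t * (t + 1) := by
    rw [ht]; split_ifs with hc
    · nlinarith
    · linarith [not_lt.mp hc]
  have hA2 : ∀ m : Int, 2 ≤ m → m < t → m * (m + 1) < 2 * N := by
    intro m hm1 hm2
    rw [ht] at hm2
    split_ifs at hm2 with hc
    · calc m * (m + 1) ≤ t0 * (t0 + 1) := mul_succ_mono (by omega) (by omega)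
        _ < 2 * N := hc
    · calc m * (m + 1) ≤ (t0 - 1) * (t0 - 1 + 1) := mul_succ_mono (by omega) (by omega)
        _ < 2 * N := by nlinarith
  have hA3 : 2 ≤ t := by rw [ht]; split_ifs <;> omega
  have htrf : t = rf := by
    rcases lt_trichotomy t rf with hlt | heq' | hgt
    · exact absurd (hmin t hA3 hlt) (by omega)
    · exact heq'
    · exact absurd (hA2 rf (by omega) hgt) (by omega)
  -- B's S equals the loop's final S
  obtain ⟨c, hc2⟩ : Even ((t - 1) * (t - 1 + 1)) := Int.even_mul_succ_self (t - 1)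
  have hc2' : (t - 1) * t = c + c := by linear_combination hc2
  have hSB : 1 + PySem.Int.floordiv ((t - 2 + 1) * (t - 2 + 2)) 2 = Sf := by
    have he : (t - 2 + 1) * (t - 2 + 2) = c + c := by linear_combination hc2
    rw [he, PySem.Int.floordiv_eq_ediv_of_pos (by omega)]
    have hSf' : 2 * Sf = 2 + (t - 1) * t := by rw [htrf] at hc2' ⊢; linarith [hSf]
    rw [hc2'] at hSf'
    omega
  -- unfold both sides
  unfold solve solve_alt
  rw [if_neg (by omega), if_neg (by omega), if_neg (by omega),
      if_neg (by omega), if_neg (by omega), if_neg (by omega)]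
  simp only [heq, hmax]
  rw [show pyIsqrt (2 * N) = t0 by rw [ht0, hmax]]
  rw [← ht]
  rw [hSB, htrf]
  rw [PySem.List.foldl_append_singleton_eq_map]
  have h3 : (2 : Int) + 1 = 3 := by norm_num
  have hr2 : rf - 2 + 2 = rf := by omega
  rw [h3, hr2, List.append_assoc]

-- ===== VERDICT (by name: the statement is the Claim_ definition above) =====
theorem solve_spec : Claim_equal_solve := by
  intro N _
  unfold Spec_solve
  by_cases h1 : N = 1
  · subst h1; rfl
  by_cases h2 : N = 2
  · subst h2; rfl
  by_cases h3 : N = 3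
  · subst h3; rfl
  rcases (show N ≤ 0 ∨ 4 ≤ N by omega) with h | h
  · rw [solveA_nonpos N h, solveB_nonpos N h]
  · exact solve_eq_of_ge N h
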